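-- pv_equiv track=rewrite | github.com/arieldelplata/proyectos | parser/afds.py | afd_puntocoma
-- ===== SOURCE A (Python) =====
-- def afd_puntocoma (cadena):
--     estado_trampa='t'
--     estado=0
--     estado_no_final=[0]
--     estado_final=[1]
--     delta={
--         0: {chr(c): 1 if (';'== chr(c) ) else estado_trampa for c in range(128)},
--     }
--     for caracter in cadena:
--         if estado in delta and caracter in delta[estado]:
--             estado = delta[estado][caracter]
--         else:
--             estado = estado_trampa
--             break
--     if estado in estado_final:
--             #estado_final=estado_final
--         estado_final='aceptado'
--     elif estado == estado_trampa:
--             #estado_final=estado_trampa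
--         estado_final='trampa'
--     elif estado in estado_no_final:
--         #estado_final=estado_no_final
--         estado_final='no aceptado'
--     return estado_final
-- ===== SOURCE B (Python) =====
-- def afd_puntocoma(cadena):
--     # Closed-form classification replacing the DFA table and stepping loop.
--     items = list(cadena)
--     if not items:
--         return 'no aceptado'
--     if len(items) == 1 and items[0] == ';':
--         return 'aceptado'
--     return 'trampa'
-- ===== Notes on version B (the rewrite author's own statement) =====
-- stated objective: simpler
-- what changed: Replaced the 128-entry DFA transition table and the state-stepping loop with a direct three-way classification: empty input -> 'no aceptado', exactly one ';' -> 'aceptado', anything else -> 'trampa'.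
import Mathlib
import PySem

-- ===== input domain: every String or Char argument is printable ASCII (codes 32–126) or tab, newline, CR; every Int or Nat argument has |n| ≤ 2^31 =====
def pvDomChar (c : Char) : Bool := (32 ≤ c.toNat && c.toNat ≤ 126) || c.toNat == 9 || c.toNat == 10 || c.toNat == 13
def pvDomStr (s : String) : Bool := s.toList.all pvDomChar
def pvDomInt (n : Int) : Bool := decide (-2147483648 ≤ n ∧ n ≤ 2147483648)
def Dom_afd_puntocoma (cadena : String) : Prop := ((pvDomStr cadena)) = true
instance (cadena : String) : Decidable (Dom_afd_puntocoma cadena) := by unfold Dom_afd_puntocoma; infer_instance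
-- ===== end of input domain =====

-- B replaces A's per-call 128-entry DFA table and stepping loop with a direct
-- three-way classification of the input (objective: simpler).


-- ===== PORT A =====
-- Python's `estado` is either the ints 0/1 or the string 't' (estado_trampa); modelled as a sum.
inductive AfdState | s0 | s1 | trap
deriving DecidableEq, Repr

-- the loop: `estado in delta` means estado = 0; `caracter in delta[estado]` means the char code < 128
-- (delta[0] maps chr(c) for c in range(128)); delta[0][c] = 1 if c = ';' else trap; `break` on the else branch.
def afdLoop : List Char → AfdState → AfdState
  | [], e => e
  | c :: rest, e =>
      if e = AfdState.s0 ∧ c.toNat < 128 then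
        afdLoop rest (if c = ';' then AfdState.s1 else AfdState.trap)
      else
        AfdState.trap   -- estado = estado_trampa; break

def afd_puntocoma (cadena : String) : String :=
  let estado := afdLoop cadena.toList AfdState.s0
  if estado = AfdState.s1 then "aceptado"          -- estado in estado_final
  else if estado = AfdState.trap then "trampa"     -- estado == estado_trampa
  else "no aceptado"                               -- estado in estado_no_final

-- ===== PORT B =====
def afd_puntocoma_alt (cadena : String) : String :=
  match cadena.toList with
  | [] => "no aceptado"
  | [c] => if c = ';' then "aceptado" else "trampa"
  | _ => "trampa"

-- ===== PRECONDITION & SPEC =====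
def Spec_afd_puntocoma (cadena : String) (out : String) : Prop := out = afd_puntocoma_alt cadena
instance (cadena : String) (out : String) : Decidable (Spec_afd_puntocoma cadena out) := by unfold Spec_afd_puntocoma; infer_instance

-- ===== CLAIM (what is proved, stated in full; the proofs are below) =====
def Claim_equal_afd_puntocoma : Prop := ∀ (cadena : String), Dom_afd_puntocoma cadena → Spec_afd_puntocoma cadena (afd_puntocoma cadena)

-- ===== LEMMAS AND PROOFS =====
-- From any non-s0 state the loop over a nonempty list lands in trap.
theorem afdLoop_from_nonzero (cs : List Char) (e : AfdState) (he : e ≠ AfdState.s0) :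
    afdLoop cs e = if cs = [] then e else AfdState.trap := by
  cases cs with
  | nil => simp [afdLoop]
  | cons c rest =>
      simp [afdLoop]
      intro h _
      exact absurd h he

-- ===== VERDICT (by name: the statement is the Claim_ definition above) =====
theorem afd_puntocoma_spec : Claim_equal_afd_puntocoma := by
  intro cadena _
  unfold Spec_afd_puntocoma afd_puntocoma afd_puntocoma_alt
  cases h : cadena.toList with
  | nil => simp [afdLoop]
  | cons c rest =>
      cases rest with
      | nil =>
          by_cases hc : c = ';'
          · simp [afdLoop, hc]
          · have h128 : c.toNat < 128 ∨ ¬ c.toNat < 128 := em _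
            rcases h128 with h1 | h1 <;> simp [afdLoop, hc, h1]
      | cons c2 rest2 =>
          by_cases h1 : c.toNat < 128
          · by_cases hc : c = ';'
            · simp [afdLoop, hc, h1,
                afdLoop_from_nonzero (c2 :: rest2) AfdState.s1 (by simp)]
            · simp [afdLoop, hc, h1,
                afdLoop_from_nonzero (c2 :: rest2) AfdState.trap (by simp)]
          · simp [afdLoop, h1]
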